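-- pv_equiv track=rewrite | github.com/MrBrantCode/unitest_baseline | mut_generate/mist_train_cf/cf_89342/solution.py | collapse_and_sort_string
-- ===== SOURCE A (Python) =====
-- def collapse_and_sort_string(input_str):
--     output = ""
--     prev_char = None
--
--     for char in input_str:
--         if char == prev_char:
--             continue
--         output += char
--         prev_char = char
--
--     return "".join(sorted(output))
-- ===== SOURCE B (Python) =====
-- def collapse_and_sort_string(input_str):
--     chars = list(input_str)
--     prevs = [None] + chars
--     return "".join(
--         c * sum(1 for p, ch in zip(prevs, chars) if ch == c and p != c)
--         for c in sorted(set(chars))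
--     )
-- ===== Notes on version B (the rewrite author's own statement) =====
-- stated objective: alternative
-- what changed: B never builds the collapsed string and keeps no prev_char accumulator: it takes the sorted distinct characters and, for each, counts the run boundaries by zipping the string with its one-step shift (predecessor list), emitting each character repeated by its boundary count.
import Mathlib
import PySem

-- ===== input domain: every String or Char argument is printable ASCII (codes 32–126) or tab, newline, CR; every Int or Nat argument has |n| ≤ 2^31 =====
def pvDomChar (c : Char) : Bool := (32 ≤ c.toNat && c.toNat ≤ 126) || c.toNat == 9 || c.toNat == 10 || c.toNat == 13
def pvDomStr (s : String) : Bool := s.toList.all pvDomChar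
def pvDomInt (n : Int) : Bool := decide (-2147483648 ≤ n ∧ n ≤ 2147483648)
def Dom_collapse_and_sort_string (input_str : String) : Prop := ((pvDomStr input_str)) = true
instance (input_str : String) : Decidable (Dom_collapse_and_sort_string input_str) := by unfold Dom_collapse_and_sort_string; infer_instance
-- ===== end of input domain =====

-- B drops A's collapse-then-sort: it iterates the sorted distinct characters and, for each,
-- counts its run boundaries by zipping the string with its predecessor list (objective: alternative).

-- ===== PORT A =====
-- one loop step of A: skip a repeat of prev_char, else append and update prev_char
def pvAstep (st : List Char × Option Char) (char : Char) : List Char × Option Char :=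
  if st.2 == some char then st else (st.1 ++ [char], some char)

def collapse_and_sort_string (input_str : String) : String :=
  String.mk (PySem.List.sorted (input_str.toList.foldl pvAstep ([], none)).1 (fun c => c) false)

-- ===== PORT B =====
-- sum(1 for p, ch in zip(prevs, chars) if ch == c and p != c)
def pvRunStarts (prevs : List (Option Char)) (chars : List Char) (c : Char) : Nat :=
  (prevs.zip chars).countP (fun pc => pc.2 == c && !(pc.1 == some c))

def collapse_and_sort_string_alt (input_str : String) : String :=
  -- chars = list(input_str); prevs = [None] + chars (inlined)
  String.mk (PySem.Chars.join []
    ((PySem.List.sorted (PySem.Set.ofList input_str.toList) (fun c => c) false).map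
      (fun c => List.replicate
        (pvRunStarts (none :: input_str.toList.map some) input_str.toList c) c)))

-- ===== PRECONDITION & SPEC =====
def Spec_collapse_and_sort_string (input_str : String) (out : String) : Prop := out = collapse_and_sort_string_alt input_str
instance (input_str : String) (out : String) : Decidable (Spec_collapse_and_sort_string input_str out) := by unfold Spec_collapse_and_sort_string; infer_instance

-- ===== CLAIM (what is proved, stated in full; the proofs are below) =====
def Claim_equal_collapse_and_sort_string : Prop := ∀ (input_str : String), Dom_collapse_and_sort_string input_str → Spec_collapse_and_sort_string input_str (collapse_and_sort_string input_str)

-- ===== LEMMAS AND PROOFS =====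

-- the characters A's loop appends (the remaining collapsed run heads), given the previous char
def pvDelta : List Char → Option Char → List Char
  | [], _ => []
  | c :: r, prev => if prev == some c then pvDelta r prev else c :: pvDelta r (some c)

theorem pvAfold (l : List Char) (out : List Char) (prev : Option Char) :
    (l.foldl pvAstep (out, prev)).1 = out ++ pvDelta l prev := by
  induction l generalizing out prev with
  | nil => simp [pvDelta]
  | cons c r ih =>
    simp only [List.foldl, pvDelta, pvAstep]
    by_cases h : prev == some c
    · rw [if_pos h, if_pos h, ih]
    · rw [if_neg h, if_neg h, ih, List.append_assoc, List.singleton_append]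

theorem pvDelta_subset (l : List Char) (prev : Option Char) (x : Char) :
    x ∈ pvDelta l prev → x ∈ l := by
  induction l generalizing prev with
  | nil => intro hx; simp [pvDelta] at hx
  | cons c r ih =>
    intro hx
    by_cases h : prev == some c
    · rw [pvDelta, if_pos h] at hx
      exact List.mem_cons_of_mem _ (ih _ hx)
    · rw [pvDelta, if_neg h] at hx
      rcases List.mem_cons.mp hx with rfl | hx
      · exact List.mem_cons_self
      · exact List.mem_cons_of_mem _ (ih _ hx)

theorem pvDelta_mem (l : List Char) (prev : Option Char) (x : Char) :
    x ∈ l → x ∈ pvDelta l prev ∨ prev = some x := by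
  induction l generalizing prev with
  | nil => intro hx; simp at hx
  | cons c r ih =>
    intro hx
    rw [pvDelta]
    by_cases h : prev == some c
    · rw [if_pos h]
      rcases List.mem_cons.mp hx with rfl | hx
      · exact Or.inr (eq_of_beq h)
      · exact ih _ hx
    · rw [if_neg h]
      rcases List.mem_cons.mp hx with rfl | hx
      · exact Or.inl List.mem_cons_self
      · rcases ih (some c) hx with hm | hp
        · exact Or.inl (List.mem_cons_of_mem _ hm)
        · exact Or.inl (by rw [Option.some.injEq] at hp; rw [hp]; exact List.mem_cons_self)

theorem pvDelta_mem_iff (l : List Char) (x : Char) : x ∈ pvDelta l none ↔ x ∈ l :=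
  ⟨pvDelta_subset l none x, fun h => (pvDelta_mem l none x h).resolve_right (by simp)⟩

-- B's zip counting = count of c among A's collapsed run heads
theorem pvZipCount (l : List Char) (prev : Option Char) (c : Char) :
    ((prev :: l.map some).zip l).countP (fun pc => pc.2 == c && !(pc.1 == some c))
      = (pvDelta l prev).count c := by
  induction l generalizing prev with
  | nil => simp [pvDelta]
  | cons x r ih =>
    simp only [List.map, List.zip_cons_cons, List.countP_cons, pvDelta]
    by_cases h : prev == some x
    · rw [if_pos h]
      have hprev : prev = some x := eq_of_beq h
      subst hprev
      by_cases hxc : x = c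
      · subst hxc
        simp [ih]
      · simp [ih]
    · rw [if_neg h]
      by_cases hxc : x = c
      · subst hxc
        have : ¬ prev = some x := fun hh => h (by simp [hh])
        simp [this, ih]
      · simp [hxc, ih]

theorem pvCountFlatRepl (l : List Char) (f : Char → ℕ) (x : Char) (hl : l.Nodup) :
    (l.flatMap (fun c => List.replicate (f c) c)).count x = if x ∈ l then f x else 0 := by
  induction l with
  | nil => simp
  | cons c r ih =>
    obtain ⟨hc, hr⟩ := List.nodup_cons.mp hl
    simp only [List.flatMap_cons, List.count_append, List.count_replicate, ih hr, List.mem_cons]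
    by_cases hx : x = c
    · subst hx; simp [hc]
    · have : ¬ c = x := fun h => hx h.symm
      simp [hx, this]

theorem pvPairwiseFlatRepl (l : List Char) (f : Char → ℕ) (h : l.Pairwise (· < ·)) :
    (l.flatMap (fun c => List.replicate (f c) c)).Pairwise (· ≤ ·) := by
  induction l with
  | nil => simp
  | cons c r ih =>
    obtain ⟨hc, hr⟩ := List.pairwise_cons.mp h
    simp only [List.flatMap_cons]
    refine List.pairwise_append.mpr ⟨?_, ih hr, ?_⟩
    · exact List.pairwise_replicate.mpr (Or.inr le_rfl)
    · intro x hx y hy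
      obtain ⟨d, hd, hy'⟩ := List.mem_flatMap.mp hy
      rw [List.eq_of_mem_replicate hx, List.eq_of_mem_replicate hy']
      exact le_of_lt (hc d hd)

theorem pvJoinNilFlatten (ps : List (List Char)) : PySem.Chars.join [] ps = ps.flatten := by
  simp only [PySem.Chars.join, List.intercalate]
  induction ps with
  | nil => simp
  | cons a r ih => cases r <;> simp_all [List.intersperse]

-- sorted of a list = emit replicate(count) over the sorted distinct elements
theorem pvSortedEqEmit (xs : List Char) :
    PySem.List.sorted xs (fun c => c) false
      = (PySem.List.sorted (PySem.Set.ofList xs) (fun c => c) false).flatMap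
          (fun c => List.replicate (xs.count c) c) := by
  have hkeysnd : (PySem.List.sorted (PySem.Set.ofList xs) (fun c : Char => c) false).Nodup :=
    (PySem.List.sorted_perm _ _ _).nodup_iff.mpr (PySem.Set.nodup_ofList xs)
  apply PySem.List.sorted_id_eq_of_perm_of_pairwise
  · rw [List.perm_iff_count]
    intro a
    rw [pvCountFlatRepl _ _ a hkeysnd]
    by_cases ha : a ∈ xs
    · simp [PySem.List.mem_sorted, PySem.Set.mem_ofList, ha]
    · simp [PySem.List.mem_sorted, PySem.Set.mem_ofList, ha, List.count_eq_zero_of_not_mem ha]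
  · exact pvPairwiseFlatRepl _ _ (PySem.List.sorted_ofList_pairwise_lt xs)

-- the two sorted key lists coincide: pvDelta keeps exactly the distinct characters
theorem pvKeysEq (l : List Char) :
    PySem.List.sorted (PySem.Set.ofList (pvDelta l none)) (fun c : Char => c) false
      = PySem.List.sorted (PySem.Set.ofList l) (fun c : Char => c) false := by
  apply PySem.List.sorted_id_eq_of_perm_of_pairwise
  · refine (PySem.List.sorted_perm _ _ _).trans ?_
    rw [List.perm_iff_count]
    intro a
    by_cases ha : a ∈ l
    · rw [List.count_eq_one_of_mem (PySem.Set.nodup_ofList _) ((PySem.Set.mem_ofList _ _).mpr ha),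
        List.count_eq_one_of_mem (PySem.Set.nodup_ofList _)
          (by rw [PySem.Set.mem_ofList, pvDelta_mem_iff]; exact ha)]
    · rw [List.count_eq_zero_of_not_mem (fun h => ha ((PySem.Set.mem_ofList _ _).mp h)),
        List.count_eq_zero_of_not_mem
          (by rw [PySem.Set.mem_ofList, pvDelta_mem_iff]; exact ha)]
  · exact List.Pairwise.imp le_of_lt (PySem.List.sorted_ofList_pairwise_lt _)

-- ===== VERDICT (by name: the statement is the Claim_ definition above) =====
theorem collapse_and_sort_string_spec : Claim_equal_collapse_and_sort_string := by
  intro input_str _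
  show _ = _
  unfold collapse_and_sort_string collapse_and_sort_string_alt
  rw [pvAfold, List.nil_append]
  set l := input_str.toList with hl
  rw [pvSortedEqEmit (pvDelta l none), pvKeysEq l, pvJoinNilFlatten, List.flatMap]
  refine congrArg String.mk (congrArg List.flatten ?_)
  apply List.map_congr_left
  intro c _
  simp only [pvRunStarts, pvZipCount]
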